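-- pv_equiv track=rewrite | github.com/JakubMlocek/Algorithms_and_Data_Structures | kolokwiaIegzaminy/pass_colloquium2/zad2v2.py | orderN2
-- ===== SOURCE A (Python) =====
-- def make_graph( L, K ):
--     n = len( L )
--     m = 10 ** K
--     G = [[] for _ in range(n) ]
--
--     for i in range( n ):
--         for j in range( n ):
--             if (L[i] % m) == (L[j] // m):
--                 G[i].append(j)
--     return G
--
-- def topologycSort(G, idx):
--     def DFSvisit(G, u):
--         visited[u] = True
--
--         for each in G[u]:
--             if not visited[each]:
--                 parent[each] = u
--                 DFSvisit(G, each)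
--         topologycklySorted.append(u)
--
--     visited = [False] * len(G)
--     parent = [None] * len(G)
--     topologycklySorted = []
--     DFSvisit(G, idx)
--
--     topologycklySorted.reverse()
--     return topologycklySorted
--
-- def orderN2(L, K):
--     m = 10 ** K
--     n = len( L )
--
--     G = make_graph( L, K )
--     _min = float('inf')
--     idx = None
--     for i in range( n ):
--         if L[i] < _min:
--             _min = L[i]
--             idx = i
--
--     tpSorted = topologycSort( G, idx )
--     result = []
--
--     for each in tpSorted:
--         result.append( L[each] )
--
--     if len(result) != len(L):
--         return None
--
--     return result
-- ===== SOURCE B (Python) =====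
-- def orderN2(L, K):
--     n = len(L)
--     m = 10 ** K
--     by_prefix = {}
--     for j in range(n):
--         by_prefix.setdefault(L[j] // m, []).append(j)
--     adj = [by_prefix.get(L[i] % m, []) for i in range(n)]
--     idx, _ = min(enumerate(L), key=lambda p: p[1])
--     visited = [False] * n
--     visited[idx] = True
--     post = []
--     stack = [(idx, 0)]
--     while stack:
--         u, k = stack.pop()
--         nb = adj[u]
--         while k < len(nb) and visited[nb[k]]:
--             k += 1
--         if k < len(nb):
--             v = nb[k]
--             stack.append((u, k + 1))
--             visited[v] = True
--             stack.append((v, 0))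
--         else:
--             post.append(u)
--     post.reverse()
--     if len(post) != n:
--         return None
--     return [L[i] for i in post]
-- ===== Notes on version B (the rewrite author's own statement) =====
-- stated objective: faster
-- what changed: B builds the adjacency lists by grouping indices in a dict keyed on L[j]//m and looking up L[i]%m (O(n+E) instead of A's O(n^2) all-pairs scan), finds the start index with min(enumerate(L)) instead of a hand-written scan, and runs the DFS with an explicit stack instead of recursion.
-- outside the precondition, e.g. on orderN2([0], -1): A returns [0], B returns [0]; on orderN2([3, 5], -1): A returns None, B returns None
import Mathlib
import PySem

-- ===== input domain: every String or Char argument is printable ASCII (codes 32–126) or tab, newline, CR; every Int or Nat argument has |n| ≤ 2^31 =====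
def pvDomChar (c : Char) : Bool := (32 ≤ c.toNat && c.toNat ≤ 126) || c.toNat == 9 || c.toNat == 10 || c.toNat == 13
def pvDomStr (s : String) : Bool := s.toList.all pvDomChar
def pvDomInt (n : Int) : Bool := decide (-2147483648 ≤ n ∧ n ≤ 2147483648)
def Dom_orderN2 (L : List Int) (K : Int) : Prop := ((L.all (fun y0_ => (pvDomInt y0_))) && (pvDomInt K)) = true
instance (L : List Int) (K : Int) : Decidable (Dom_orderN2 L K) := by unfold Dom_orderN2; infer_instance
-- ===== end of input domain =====

-- B replaces A's O(n^2) all-pairs edge scan with a dict grouping indices by prefix value (O(n+E))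
-- and runs the same DFS with an explicit stack instead of recursion; measurably faster.

-- ===== PORT A =====
-- make_graph: for i in range(n): for j in range(n): if L[i] % m == L[j] // m: G[i].append(j)
-- (m = 10**K ported as 10 ^ K.toNat: faithful for 0 ≤ K; K < 0 makes Python m a float, excluded by Pre_.
--  L[i]/L[j] for i,j in range(n) are always in range, ported as getD.)
def makeGraph (L : List Int) (K : Int) : List (List Nat) :=
  let n := L.length
  let m : Int := 10 ^ K.toNat
  (List.range n).map (fun i =>
    (List.range n).foldl (fun acc j =>
      if PySem.Int.mod (L.getD i 0) m = PySem.Int.floordiv (L.getD j 0) m then acc ++ [j]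
      else acc) [])

-- DFSvisit: recursion ported with a fuel bound (depth ≤ #nodes, so G.length + 1 never runs out);
-- the `parent` list of the Python is written but never read, so it is not threaded here.
def dfsA (G : List (List Nat)) : Nat → Nat → List Bool → List Nat → List Bool × List Nat
  | 0, _, vis, post => (vis, post)
  | f+1, u, vis, post =>
    let r := (G.getD u []).foldl
      (fun s v => if s.1.getD v false then s else dfsA G f v s.1 s.2)
      (vis.set u true, post)
    (r.1, r.2 ++ [u])

def topoSortA (G : List (List Nat)) (idx : Nat) : List Nat :=
  ((dfsA G (G.length + 1) idx (List.replicate G.length false) []).2).reverse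

-- the strict-min scan of orderN2 (_min = inf, idx = None)
def minScanA (L : List Int) : Option Int × Option Nat :=
  (List.range L.length).foldl (fun s i =>
    if (match s.1 with | none => true | some mn => decide (L.getD i 0 < mn))
    then (some (L.getD i 0), some i) else s)
    (none, none)

def orderN2 (L : List Int) (K : Int) : Option (List Int) :=
  let G := makeGraph L K
  match (minScanA L).2 with
  | none => none  -- Python: DFSvisit(G, None) raises TypeError here (only for L = []); excluded by Pre_
  | some idx =>
    let result := (topoSortA G idx).map (fun e => L.getD e 0)
    if result.length ≠ L.length then none else some result

-- ===== PORT B =====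
-- by_prefix.setdefault(L[j] // m, []).append(j)  is exactly Dict.modify key [] (· ++ [j])
def buildPrefix (L : List Int) (m : Int) : PySem.Dict Int (List Nat) :=
  (List.range L.length).foldl
    (fun d j => d.modify (PySem.Int.floordiv (L.getD j 0) m) [] (· ++ [j]))
    PySem.Dict.empty

-- adj = [by_prefix.get(L[i] % m, []) for i in range(n)]
def adjB (L : List Int) (m : Int) : List (List Nat) :=
  (List.range L.length).map (fun i => (buildPrefix L m).getD (PySem.Int.mod (L.getD i 0) m) [])

-- inner while loop: skip neighbours already visited, return first unvisited one with its index
def fU (vis : List Bool) : List Nat → Nat → Option (Nat × Nat)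
  | [], _ => none
  | v :: rest, k => if vis.getD v false then fU vis rest (k+1) else some (k, v)

-- the stack machine of Source B (stack top = list head); the while loop gets a fuel bound:
-- every step pops a frame or marks a new node, so 3*n + 2 steps always suffice
def runB (adj : List (List Nat)) : Nat → List (Nat × Nat) → List Bool → List Nat → List Bool × List Nat
  | 0, _, vis, post => (vis, post)
  | _+1, [], vis, post => (vis, post)
  | f+1, (u, k) :: rest, vis, post =>
    let nbs := adj.getD u []
    match fU vis (nbs.drop k) k with
    | none => runB adj f rest vis (post ++ [u])
    | some (k', v) => runB adj f ((v, 0) :: (u, k' + 1) :: rest) (vis.set v true) post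

def orderN2_alt (L : List Int) (K : Int) : Option (List Int) :=
  let n := L.length
  let m : Int := 10 ^ K.toNat
  let adj := adjB L m
  -- idx, _ = min(enumerate(L), key=lambda p: p[1])  (min() raises ValueError on [] — excluded by Pre_)
  match PySem.List.min? (PySem.List.enumerate L 0) (fun p => p.2) with
  | none => none
  | some p =>
    let idx := p.1.toNat  -- enumerate indices are ≥ 0
    let visited := (List.replicate n false).set idx true
    let r := runB adj (3 * n + 2) [(idx, 0)] visited []
    let post := r.2.reverse
    if post.length ≠ n then none else some (post.map (fun e => L.getD e 0))

-- ===== PRECONDITION & SPEC =====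
-- Pre_ excludes L = [], where A raises TypeError (DFSvisit is called with idx = None), and K < 0,
-- where Python computes m = 10**K as a FLOAT so that A's result depends on floating-point
-- arithmetic that the Int ports cannot express.
def Pre_orderN2 (L : List Int) (K : Int) : Prop := L ≠ [] ∧ 0 ≤ K
instance (L : List Int) (K : Int) : Decidable (Pre_orderN2 L K) := by unfold Pre_orderN2; infer_instance

def pvWitness_orderN2 : List Int × Int := ([12, 21], 1)

def Spec_orderN2 (L : List Int) (K : Int) (out : Option (List Int)) : Prop := out = orderN2_alt L K
instance (L : List Int) (K : Int) (out : Option (List Int)) : Decidable (Spec_orderN2 L K out) := by unfold Spec_orderN2; infer_instance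

-- ===== CLAIM (what is proved, stated in full; the proofs are below) =====
def Claim_equal_orderN2 : Prop := ∀ (L : List Int) (K : Int), Dom_orderN2 L K → Pre_orderN2 L K → Spec_orderN2 L K (orderN2 L K)

-- ===== LEMMAS AND PROOFS =====

-- count of unvisited entries: the termination / fuel measure
def cF (vis : List Bool) : Nat := vis.count false

lemma cF_le_length (vis : List Bool) : cF vis ≤ vis.length := List.count_le_length

lemma cF_set_le (vis : List Bool) (u : Nat) : cF (vis.set u true) ≤ cF vis := by
  induction vis generalizing u with
  | nil => simp [cF]
  | cons b t ih =>
    cases u with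
    | zero => cases b <;> simp [cF]
    | succ u =>
      have := ih u
      simp only [cF, List.set_cons_succ, List.count_cons] at *
      omega

lemma cF_set_lt (vis : List Bool) (u : Nat) (hu : u < vis.length)
    (hf : vis.getD u false = false) : cF (vis.set u true) < cF vis := by
  induction vis generalizing u with
  | nil => simp at hu
  | cons b t ih =>
    cases u with
    | zero =>
      simp only [List.getD_cons_zero] at hf
      subst hf
      simp [cF]
    | succ u =>
      have hu' : u < t.length := by simpa using hu
      have hf' : t.getD u false = false := by simpa using hf
      have := ih u hu' hf'
      simp only [cF, List.set_cons_succ, List.count_cons] at *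
      omega

lemma cF_pos (vis : List Bool) (u : Nat) (hu : u < vis.length)
    (hf : vis.getD u false = false) : 1 ≤ cF vis :=
  Nat.lt_of_le_of_lt (Nat.zero_le _) (cF_set_lt vis u hu hf)

-- the neighbour loop of dfsA, as its own function
def goA (G : List (List Nat)) (f : Nat) (nbs : List Nat) (vis : List Bool) (post : List Nat) :
    List Bool × List Nat :=
  nbs.foldl (fun s v => if s.1.getD v false then s else dfsA G f v s.1 s.2) (vis, post)

lemma dfsA_succ (G : List (List Nat)) (f u : Nat) (vis : List Bool) (post : List Nat) :
    dfsA G (f+1) u vis post =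
      ((goA G f (G.getD u []) (vis.set u true) post).1,
       (goA G f (G.getD u []) (vis.set u true) post).2 ++ [u]) := by
  rw [dfsA]; rfl

lemma goA_nil (G : List (List Nat)) (f : Nat) (vis : List Bool) (post : List Nat) :
    goA G f [] vis post = (vis, post) := rfl

lemma goA_cons (G : List (List Nat)) (f v : Nat) (nbs : List Nat) (vis : List Bool) (post : List Nat) :
    goA G f (v :: nbs) vis post =
      if vis.getD v false then goA G f nbs vis post
      else goA G f nbs (dfsA G f v vis post).1 (dfsA G f v vis post).2 := by
  simp only [goA, List.foldl_cons]
  split <;> simp_all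

-- dfsA / goA preserve the length of visited
lemma dfsgo_len : ∀ f,
    (∀ (G : List (List Nat)) u vis post, (dfsA G f u vis post).1.length = vis.length) ∧
    (∀ (G : List (List Nat)) nbs vis post, (goA G f nbs vis post).1.length = vis.length) := by
  intro f
  induction f with
  | zero =>
    constructor
    · intro G u vis post; rfl
    · intro G nbs vis post
      induction nbs generalizing vis post with
      | nil => rfl
      | cons v rest ih =>
        rw [goA_cons]
        split
        · exact ih vis post
        · have : (dfsA G 0 v vis post) = (vis, post) := rfl
          rw [this]; exact ih vis post
  | succ f ih =>
    have hdfs : ∀ (G : List (List Nat)) u vis post, (dfsA G (f+1) u vis post).1.length = vis.length := by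
      intro G u vis post
      rw [dfsA_succ]
      simp only
      rw [ih.2]
      simp
    constructor
    · exact hdfs
    · intro G nbs vis post
      induction nbs generalizing vis post with
      | nil => rfl
      | cons v rest ih2 =>
        rw [goA_cons]
        split
        · exact ih2 vis post
        · rw [ih2]
          exact hdfs G v vis post


lemma dfs_len (G : List (List Nat)) (f u : Nat) (vis : List Bool) (post : List Nat) :
    (dfsA G f u vis post).1.length = vis.length := (dfsgo_len f).1 G u vis post

-- dfsA / goA never unmark: cF only shrinks
lemma dfsgo_cF : ∀ f,
    (∀ (G : List (List Nat)) u vis post, cF (dfsA G f u vis post).1 ≤ cF vis) ∧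
    (∀ (G : List (List Nat)) nbs vis post, cF (goA G f nbs vis post).1 ≤ cF vis) := by
  intro f
  induction f with
  | zero =>
    constructor
    · intro G u vis post; exact le_refl _
    · intro G nbs vis post
      induction nbs generalizing vis post with
      | nil => exact le_refl _
      | cons v rest ih =>
        rw [goA_cons]
        split
        · exact ih vis post
        · have : (dfsA G 0 v vis post) = (vis, post) := rfl
          rw [this]; exact ih vis post
  | succ f ih =>
    have hdfs : ∀ (G : List (List Nat)) u vis post, cF (dfsA G (f+1) u vis post).1 ≤ cF vis := by
      intro G u vis post
      rw [dfsA_succ]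
      simp only
      exact le_trans (ih.2 G _ _ _) (cF_set_le vis u)
    constructor
    · exact hdfs
    · intro G nbs vis post
      induction nbs generalizing vis post with
      | nil => exact le_refl _
      | cons v rest ih2 =>
        rw [goA_cons]
        split
        · exact ih2 vis post
        · exact le_trans (ih2 _ _) (hdfs G v vis post)

lemma dfs_cF (G : List (List Nat)) (f u : Nat) (vis : List Bool) (post : List Nat) :
    cF (dfsA G f u vis post).1 ≤ cF vis := (dfsgo_cF f).1 G u vis post

-- fuel irrelevance: with enough fuel the result does not depend on the fuel
lemma dfsgo_fuel : ∀ f,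
    (∀ g (G : List (List Nat)) u vis post, G.length = vis.length →
      (∀ w x, x ∈ G.getD w [] → x < vis.length) → vis.getD u false = false →
      cF vis ≤ f → cF vis ≤ g → 1 ≤ f → 1 ≤ g →
      dfsA G f u vis post = dfsA G g u vis post) ∧
    (∀ g (G : List (List Nat)) nbs vis post, G.length = vis.length →
      (∀ w x, x ∈ G.getD w [] → x < vis.length) → (∀ v ∈ nbs, v < vis.length) →
      cF vis ≤ f → cF vis ≤ g →
      goA G f nbs vis post = goA G g nbs vis post) := by
  intro f
  induction f with
  | zero =>
    constructor
    · intro g G u vis post _ _ _ _ _ h1 _; omega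
    · intro g G nbs vis post hGL hHG hnb hf hg
      induction nbs generalizing vis post with
      | nil => rw [goA_nil, goA_nil]
      | cons v rest ih =>
        rw [goA_cons, goA_cons]
        cases h : vis.getD v false with
        | true => simp only [if_true]; exact ih vis post hGL hHG (fun x hx => hnb x (List.mem_cons_of_mem _ hx)) hf hg
        | false =>
          exfalso
          have := cF_pos vis v (hnb v List.mem_cons_self) h
          omega
  | succ f ih =>
    have hdfs : ∀ g (G : List (List Nat)) u vis post, G.length = vis.length →
        (∀ w x, x ∈ G.getD w [] → x < vis.length) → vis.getD u false = false →
        cF vis ≤ f + 1 → cF vis ≤ g → 1 ≤ f + 1 → 1 ≤ g →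
        dfsA G (f+1) u vis post = dfsA G g u vis post := by
      intro g G u vis post hGL hHG hu hf hg _ hg1
      obtain ⟨g', rfl⟩ : ∃ g', g = g' + 1 := ⟨g - 1, by omega⟩
      rw [dfsA_succ, dfsA_succ]
      by_cases hu' : u < vis.length
      · have hlt := cF_set_lt vis u hu' hu
        have hgo : goA G f (G.getD u []) (vis.set u true) post
            = goA G g' (G.getD u []) (vis.set u true) post := by
          apply ih.2 g' G _ _ post
          · rw [List.length_set]; exact hGL
          · intro w x hx; rw [List.length_set]; exact hHG w x hx
          · intro v hv; rw [List.length_set]; exact hHG u v hv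
          · omega
          · omega
        rw [hgo]
      · have hnil : G.getD u [] = [] := by
          apply List.getD_eq_default
          omega
        rw [hnil, goA_nil, goA_nil]
    constructor
    · exact hdfs
    · intro g G nbs vis post hGL hHG hnb hf hg
      induction nbs generalizing vis post with
      | nil => rw [goA_nil, goA_nil]
      | cons v rest ih2 =>
        rw [goA_cons, goA_cons]
        cases h : vis.getD v false with
        | true => simp only [if_true]; exact ih2 vis post hGL hHG (fun x hx => hnb x (List.mem_cons_of_mem _ hx)) hf hg
        | false =>
          simp only [Bool.false_eq_true, if_false]
          have hvlt : v < vis.length := hnb v List.mem_cons_self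
          have h1 : 1 ≤ cF vis := cF_pos vis v hvlt h
          have hde : dfsA G (f+1) v vis post = dfsA G g v vis post :=
            hdfs g G v vis post hGL hHG h hf hg (by omega) (by omega)
          rw [← hde]
          have hlen : (dfsA G (f+1) v vis post).1.length = vis.length := dfs_len G (f+1) v vis post
          have hcf : cF (dfsA G (f+1) v vis post).1 ≤ cF vis := dfs_cF G (f+1) v vis post
          apply ih2 _ _ (by omega) (fun w x hx => by rw [hlen]; exact hHG w x hx)
            (fun x hx => by rw [hlen]; exact hnb x (List.mem_cons_of_mem _ hx))
          · omega
          · omega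

-- skip-loop characterisations
lemma fU_none_goA (vis : List Bool) : ∀ (l : List Nat) k, fU vis l k = none →
    ∀ (G : List (List Nat)) f post, goA G f l vis post = (vis, post) := by
  intro l
  induction l with
  | nil => intro k _ G f post; rw [goA_nil]
  | cons v rest ih =>
    intro k hfu G f post
    rw [fU] at hfu
    cases h : vis.getD v false with
    | false => rw [h] at hfu; simp at hfu
    | true =>
      rw [h] at hfu
      simp only [if_true] at hfu
      rw [goA_cons]
      simp only [h, if_true]
      exact ih (k+1) hfu G f post

lemma fU_some_spec (vis : List Bool) : ∀ (l : List Nat) k k' v, fU vis l k = some (k', v) →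
    vis.getD v false = false ∧ v ∈ l ∧
    ∃ j, k' = k + j ∧ l.drop j = v :: l.drop (j+1) ∧
      (∀ (G : List (List Nat)) f post, goA G f l vis post = goA G f (l.drop j) vis post) := by
  intro l
  induction l with
  | nil => intro k k' v h; rw [fU] at h; exact absurd h (by simp)
  | cons w rest ih =>
    intro k k' v hfu
    rw [fU] at hfu
    cases h : vis.getD w false with
    | true =>
      rw [h] at hfu
      simp only [if_true] at hfu
      obtain ⟨hvv, hmem, j', hk', hdrop, hgo⟩ := ih (k+1) k' v hfu
      refine ⟨hvv, List.mem_cons_of_mem _ hmem, j' + 1, by omega, by simpa using hdrop, ?_⟩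
      intro G f post
      rw [goA_cons]
      simp only [h, if_true]
      rw [hgo G f post]
      simp
    | false =>
      rw [h] at hfu
      simp only [Bool.false_eq_true, if_false, Option.some.injEq, Prod.mk.injEq] at hfu
      obtain ⟨rfl, rfl⟩ := hfu
      exact ⟨h, List.mem_cons_self, 0, by omega, by simp, fun G f post => by simp⟩

-- what the stack machine computes, frame by frame, in terms of the recursive DFS
def foldT (adj : List (List Nat)) (Ω : Nat) : List (Nat × Nat) → List Bool → List Nat → List Bool × List Nat
  | [], vis, post => (vis, post)
  | (u, k) :: rest, vis, post =>
    let r := goA adj Ω ((adj.getD u []).drop k) vis post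
    foldT adj Ω rest r.1 (r.2 ++ [u])

lemma runB_step_none {adj : List (List Nat)} {vis : List Bool} {u k : Nat} {f : Nat}
    {rest : List (Nat × Nat)} {post : List Nat}
    (hfu : fU vis ((adj.getD u []).drop k) k = none) :
    runB adj (f+1) ((u,k) :: rest) vis post = runB adj f rest vis (post ++ [u]) := by
  rw [runB]; simp only [hfu]

lemma runB_step_some {adj : List (List Nat)} {vis : List Bool} {u k k' v : Nat} {f : Nat}
    {rest : List (Nat × Nat)} {post : List Nat}
    (hfu : fU vis ((adj.getD u []).drop k) k = some (k', v)) :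
    runB adj (f+1) ((u,k) :: rest) vis post
      = runB adj f ((v, 0) :: (u, k' + 1) :: rest) (vis.set v true) post := by
  rw [runB]; simp only [hfu]

lemma foldT_nil (adj : List (List Nat)) (Ω : Nat) (vis : List Bool) (post : List Nat) :
    foldT adj Ω [] vis post = (vis, post) := rfl

lemma foldT_cons (adj : List (List Nat)) (Ω u k : Nat) (rest : List (Nat × Nat))
    (vis : List Bool) (post : List Nat) :
    foldT adj Ω ((u,k) :: rest) vis post =
      foldT adj Ω rest (goA adj Ω ((adj.getD u []).drop k) vis post).1
        ((goA adj Ω ((adj.getD u []).drop k) vis post).2 ++ [u]) := by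
  rw [foldT]

-- THE SIMULATION: the stack machine equals the frame-wise recursive DFS
lemma SIM : ∀ fB (adj : List (List Nat)) st vis post,
    adj.length = vis.length →
    (∀ w x, x ∈ adj.getD w [] → x < vis.length) →
    3 * cF vis + st.length < fB →
    runB adj fB st vis post = foldT adj (vis.length + 1) st vis post := by
  intro fB
  induction fB using Nat.strong_induction_on with
  | _ fB IH =>
  intro adj st vis post hGL hHG hfuel
  match fB, st with
  | 0, st => omega
  | f+1, [] => rw [runB, foldT_nil]
  | f+1, (u,k) :: rest =>
    have hstlen : ((u,k) :: rest).length = rest.length + 1 := List.length_cons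
    cases hfu : fU vis ((adj.getD u []).drop k) k with
    | none =>
      rw [runB_step_none hfu]
      rw [IH f (by omega) adj rest vis (post ++ [u]) hGL hHG (by omega)]
      rw [foldT_cons, fU_none_goA vis _ k hfu adj _ post]
    | some kv =>
      obtain ⟨k', v⟩ := kv
      obtain ⟨hvv, hmem, j, hkj, hdropj, hgo⟩ := fU_some_spec vis _ k k' v hfu
      have hvadj : v ∈ adj.getD u [] := List.mem_of_mem_drop hmem
      have hvlt : v < vis.length := hHG u v hvadj
      have hlen1 : (vis.set v true).length = vis.length := List.length_set
      have hcflt : cF (vis.set v true) < cF vis := cF_set_lt vis v hvlt hvv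
      rw [runB_step_some hfu]
      rw [IH f (by omega) adj _ (vis.set v true) post (by rw [hlen1]; exact hGL)
        (fun w x hx => by rw [hlen1]; exact hHG w x hx) (by simp only [List.length_cons]; omega)]
      rw [hlen1]
      -- unfold the two frames on the left, one frame on the right
      rw [foldT_cons, foldT_cons, foldT_cons]
      -- identify the inner DFS results
      have hq : goA adj (vis.length + 1) ((adj.getD u []).drop k) vis post
          = goA adj (vis.length + 1) ((adj.getD u []).drop (k'+1))
              (goA adj (vis.length + 1) ((adj.getD v []).drop 0) (vis.set v true) post).1
              ((goA adj (vis.length + 1) ((adj.getD v []).drop 0) (vis.set v true) post).2 ++ [v]) := by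
        rw [hgo adj _ post, hdropj, goA_cons]
        simp only [hvv, Bool.false_eq_true, if_false]
        have hdfs : dfsA adj (vis.length + 1) v vis post
            = ((goA adj (vis.length + 1) ((adj.getD v []).drop 0) (vis.set v true) post).1,
               (goA adj (vis.length + 1) ((adj.getD v []).drop 0) (vis.set v true) post).2 ++ [v]) := by
          rw [dfsA_succ, List.drop_zero]
          have := (dfsgo_fuel vis.length).2 (vis.length + 1) adj (adj.getD v [])
            (vis.set v true) post (by rw [hlen1]; exact hGL)
            (fun w x hx => by rw [hlen1]; exact hHG w x hx)
            (fun x hx => by rw [hlen1]; exact hHG v x hx)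
            (le_trans (cF_le_length _) (le_of_eq hlen1)) (by have := cF_le_length (vis.set v true); omega)
          rw [this]
        rw [hdfs]
        have hdd : ((adj.getD u []).drop k).drop (j+1) = (adj.getD u []).drop (k'+1) := by
          rw [List.drop_drop]; congr 1; omega
        rw [hdd]
      rw [hq]

-- B's grouping dict looked up at c is exactly the filtered index list
lemma buildPrefix_getD (L : List Int) (m c : Int) :
    (buildPrefix L m).getD c [] =
      (List.range L.length).filter (fun j => PySem.Int.floordiv (L.getD j 0) m == c) := by
  unfold buildPrefix
  rw [show (fun (d : PySem.Dict Int (List Nat)) (j : Nat) =>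
        d.modify (PySem.Int.floordiv (L.getD j 0) m) [] (· ++ [j]))
      = (fun d j => ((fun (p : Int × Nat) => (fun d' (p' : Int × Nat) =>
          PySem.Dict.modify d' p'.1 [] (· ++ [p'.2])) d p)
            ((fun j' => (PySem.Int.floordiv (L.getD j' 0) m, j')) j))) from rfl]
  rw [← List.foldl_map]
  rw [PySem.Dict.getD_foldl_modify_append]
  rw [PySem.Dict.getD_empty, List.filter_map, List.map_map]
  simp [Function.comp_def]

-- A's graph = B's adjacency
lemma graph_eq (L : List Int) (K : Int) :
    makeGraph L K = adjB L (10 ^ K.toNat) := by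
  unfold makeGraph adjB
  apply List.map_congr_left
  intro i _
  rw [PySem.List.foldl_append_ite_eq_filter
    (fun j => PySem.Int.mod (L.getD i 0) (10 ^ K.toNat) = PySem.Int.floordiv (L.getD j 0) (10 ^ K.toNat))]
  rw [buildPrefix_getD]
  rw [List.nil_append]
  apply List.filter_congr
  intro j _
  by_cases h : PySem.Int.mod (L.getD i 0) (10 ^ K.toNat) = PySem.Int.floordiv (L.getD j 0) (10 ^ K.toNat)
  · have h2 : (PySem.Int.floordiv (L.getD j 0) (10 ^ K.toNat)
        == PySem.Int.mod (L.getD i 0) (10 ^ K.toNat)) = true := beq_iff_eq.mpr h.symm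
    rw [decide_eq_true h, h2]
  · have h2 : (PySem.Int.floordiv (L.getD j 0) (10 ^ K.toNat)
        == PySem.Int.mod (L.getD i 0) (10 ^ K.toNat)) = false := beq_eq_false_iff_ne.mpr (Ne.symm h)
    rw [decide_eq_false h, h2]

lemma adjB_mem_lt (L : List Int) (m : Int) :
    ∀ w x, x ∈ (adjB L m).getD w [] → x < L.length := by
  intro w x hx
  unfold adjB at hx
  by_cases hw : w < L.length
  · rw [PySem.List.getD_map_range _ _ _ _ (by simpa using hw)] at hx
    rw [buildPrefix_getD] at hx
    have := List.mem_of_mem_filter hx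
    simpa using this
  · rw [List.getD_eq_default] at hx
    · simp at hx
    · simpa using Nat.le_of_not_lt hw

-- A's strict-min scan = first-minimum of enumerate (what min(enumerate(L), key=...) returns)
lemma minScan_eq (L : List Int) :
    minScanA L =
      ((PySem.List.min? (PySem.List.enumerate L 0) (fun p => p.2)).map (fun p => p.2),
       (PySem.List.min? (PySem.List.enumerate L 0) (fun p => p.2)).map (fun p => p.1.toNat)) := by
  induction L using List.reverseRecOn with
  | nil => rfl
  | append_singleton M a ih =>
    have hstep : ∀ (s : Option Int × Option Nat) (i : Nat), i ∈ List.range M.length →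
        (fun s (i : Nat) => if (match s.1 with
            | none => true | some mn => decide ((M ++ [a]).getD i 0 < mn))
          then (some ((M ++ [a]).getD i 0), some i) else s) s i
        = (fun s (i : Nat) => if (match s.1 with
            | none => true | some mn => decide (M.getD i 0 < mn))
          then (some (M.getD i 0), some i) else s) s i := by
      intro s i hi
      beta_reduce
      rw [List.getD_append _ _ _ _ (List.mem_range.mp hi)]
    have hgetLast : (M ++ [a]).getD M.length 0 = a := by
      rw [List.getD_append_right _ _ _ _ (le_refl _)]
      simp
    have hAstep : minScanA (M ++ [a])
        = (if (match (minScanA M).1 with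
            | none => true | some mn => decide (a < mn))
          then (some a, some M.length) else minScanA M) := by
      unfold minScanA
      rw [show (M ++ [a]).length = M.length + 1 by simp, List.range_succ, List.foldl_append]
      rw [PySem.List.foldl_congr_mem _ _ _ _ hstep]
      rw [List.foldl_cons, List.foldl_nil, hgetLast]
    have henum : PySem.List.enumerate (M ++ [a]) 0
        = PySem.List.enumerate M 0 ++ [((M.length : Int), a)] := by
      rw [PySem.List.enumerate_append]
      simp [PySem.List.enumerate_cons]
    rw [hAstep, henum]
    cases ho : PySem.List.min? (PySem.List.enumerate M 0) (fun p => p.2) with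
    | none =>
      have hM : M = [] := by
        have := (PySem.List.min?_eq_none_iff _ _).mp ho
        cases M with
        | nil => rfl
        | cons x t => rw [PySem.List.enumerate_cons] at this; exact absurd this (by simp)
      subst hM
      rfl
    | some p =>
      rw [ho] at ih
      rw [ih]
      have hstep2 : PySem.List.min? (PySem.List.enumerate M 0 ++ [((M.length : Int), a)]) (fun q => q.2)
          = if a < p.2 then some ((M.length : Int), a) else some p := by
        simp only [PySem.List.min?] at ho
        simp only [PySem.List.min?, List.foldl_append, ho, List.foldl_cons, List.foldl_nil]
      rw [hstep2]
      by_cases hap : a < p.2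
      · simp [hap]
      · simp [hap]

-- the two pipelines produce the same topological order
lemma topo_eq (L : List Int) (K : Int) (idx : Nat) :
    topoSortA (adjB L (10 ^ K.toNat)) idx
      = ((runB (adjB L (10 ^ K.toNat)) (3 * L.length + 2) [(idx, 0)]
          ((List.replicate L.length false).set idx true) []).2).reverse := by
  set m : Int := 10 ^ K.toNat with hm
  set adj := adjB L m with hadj
  set vis1 := (List.replicate L.length false).set idx true with hvis1
  have hadjlen : adj.length = L.length := by rw [hadj]; unfold adjB; simp
  have hHG : ∀ w x, x ∈ adj.getD w [] → x < L.length := by rw [hadj]; exact adjB_mem_lt L m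
  have hv1len : vis1.length = L.length := by rw [hvis1]; simp
  have hcf1 : cF vis1 ≤ L.length := le_trans (cF_le_length _) (le_of_eq hv1len)
  have hrun : runB adj (3 * L.length + 2) [(idx, 0)] vis1 []
      = foldT adj (L.length + 1) [(idx, 0)] vis1 [] := by
    rw [SIM (3 * L.length + 2) adj _ _ [] (by rw [hv1len, hadjlen])
      (fun w x hx => by rw [hv1len]; exact hHG w x hx)
      (by simp only [List.length_cons, List.length_nil]; omega), hv1len]
  have hfold : foldT adj (L.length + 1) [(idx, 0)] vis1 []
      = ((goA adj (L.length + 1) (adj.getD idx []) vis1 []).1,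
         (goA adj (L.length + 1) (adj.getD idx []) vis1 []).2 ++ [idx]) := by
    rw [foldT_cons, List.drop_zero, foldT_nil]
  have hfuel : goA adj L.length (adj.getD idx []) vis1 []
      = goA adj (L.length + 1) (adj.getD idx []) vis1 [] :=
    (dfsgo_fuel L.length).2 (L.length + 1) adj _ vis1 []
      (by rw [hv1len, hadjlen]) (fun w x hx => by rw [hv1len]; exact hHG w x hx)
      (fun x hx => by rw [hv1len]; exact hHG idx x hx) hcf1 (by omega)
  unfold topoSortA
  rw [hrun, hfold]
  simp only [hadjlen]
  rw [dfsA_succ, hfuel]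

-- ===== VERDICT (by name: the statement is the Claim_ definition above) =====
theorem orderN2_spec : Claim_equal_orderN2 := by
  intro L K _hD hPre
  obtain ⟨hL, _hK⟩ := hPre
  unfold Spec_orderN2
  cases ho : PySem.List.min? (PySem.List.enumerate L 0) (fun p => p.2) with
  | none =>
    exfalso
    have h1 := (PySem.List.min?_eq_none_iff _ _).mp ho
    cases L with
    | nil => exact hL rfl
    | cons x t => rw [PySem.List.enumerate_cons] at h1; exact absurd h1 (by simp)
  | some p =>
    have hidx : (minScanA L).2 = some p.1.toNat := by rw [minScan_eq L, ho]; rfl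
    unfold orderN2 orderN2_alt
    rw [graph_eq L K, hidx, ho]
    simp only
    rw [topo_eq L K p.1.toNat]
    rw [List.length_map]
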